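-- pv_equiv track=rewrite | github.com/maks1makrov/repeat | hw3.py | semi_perfekt_digits_1
-- ===== SOURCE A (Python) =====
-- def semi_perfekt_digits_1(digit):
--     from itertools import combinations
--     result = []
--     for div in range(1, digit+1):
--         total = []
--         for i in range(1, div):
--             if not div % i:
--                 total.append(i)
--         for i in range(1, len(total) + 1):
--             if div in list(map(sum, combinations(total, i))):
--                 result.append(div)
--                 break
--     return result
-- ===== SOURCE B (Python) =====
-- def semi_perfekt_digits_1(digit):
--     result = []
--     for div in range(1, digit + 1):
--         sums = {0}
--         for i in range(1, div):
--             if div % i == 0: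
--                 sums = sums | {s + i for s in sums}
--         if div in sums:
--             result.append(div)
--     return result
-- ===== Notes on version B (the rewrite author's own statement) =====
-- stated objective: alternative
-- what changed: Replaces A's per-number enumeration of all combinations of proper divisors (itertools.combinations for every subset size) with a subset-sum dynamic-programming set of reachable divisor sums built in one pass over the divisors, merged with the divisor-collecting loop.
import Mathlib
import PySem

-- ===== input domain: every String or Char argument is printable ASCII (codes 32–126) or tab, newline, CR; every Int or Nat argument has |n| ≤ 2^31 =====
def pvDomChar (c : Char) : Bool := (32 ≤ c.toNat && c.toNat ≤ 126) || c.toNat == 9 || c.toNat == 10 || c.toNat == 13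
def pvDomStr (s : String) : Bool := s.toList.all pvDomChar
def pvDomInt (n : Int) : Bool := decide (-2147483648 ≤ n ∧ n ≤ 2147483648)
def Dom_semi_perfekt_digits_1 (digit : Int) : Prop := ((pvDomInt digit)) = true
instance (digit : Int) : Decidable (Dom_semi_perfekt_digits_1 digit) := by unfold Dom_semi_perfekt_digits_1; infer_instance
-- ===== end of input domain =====

-- B replaces A's per-number enumeration of all divisor combinations with a subset-sum DP set
-- of reachable divisor sums (objective: alternative algorithm).

-- ===== PORT A =====
-- A's inner 'for i in range(1, len(total)+1): if div in …: append; break' appends div exactly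
-- once iff some subset size succeeds, ported as List.any over the same range.
def semi_perfekt_digits_1 (digit : Int) : List Int :=
  (PySem.List.pyRange 1 (digit + 1)).foldl
    (fun result div =>
      let total : List Int :=
        (PySem.List.pyRange 1 div).foldl
          (fun total i => if PySem.Int.mod div i == 0 then total ++ [i] else total) []
      if (PySem.List.pyRange 1 ((total.length : Int) + 1)).any
          (fun i => decide (div ∈ (PySem.List.combinations total i.toNat).map List.sum))
      then result ++ [div] else result)
    []

-- ===== PORT B =====
def semi_perfekt_digits_1_alt (digit : Int) : List Int :=
  (PySem.List.pyRange 1 (digit + 1)).foldl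
    (fun result div =>
      let sums : PySem.Set Int :=
        (PySem.List.pyRange 1 div).foldl
          (fun sums i =>
            if PySem.Int.mod div i == 0 then
              PySem.Set.union sums (PySem.Set.ofList (sums.map (fun s => s + i)))
            else sums)
          (PySem.Set.ofList [(0 : Int)])
      if div ∈ sums then result ++ [div] else result)
    []

-- ===== PRECONDITION & SPEC =====
def Spec_semi_perfekt_digits_1 (digit : Int) (out : List Int) : Prop := out = semi_perfekt_digits_1_alt digit
instance (digit : Int) (out : List Int) : Decidable (Spec_semi_perfekt_digits_1 digit out) := by unfold Spec_semi_perfekt_digits_1; infer_instance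

-- ===== CLAIM (what is proved, stated in full; the proofs are below) =====
def Claim_equal_semi_perfekt_digits_1 : Prop := ∀ (digit : Int), Dom_semi_perfekt_digits_1 digit → Spec_semi_perfekt_digits_1 digit (semi_perfekt_digits_1 digit)

-- ===== LEMMAS AND PROOFS =====

-- The DP fold reaches x iff x = y + sum t for some y already in the set and some sublist t.
theorem mem_sumsFold (l : List Int) (S : PySem.Set Int) (x : Int) :
    x ∈ l.foldl
        (fun sums i => PySem.Set.union sums (PySem.Set.ofList (sums.map (fun s => s + i)))) S
      ↔ ∃ t : List Int, t.Sublist l ∧ ∃ y ∈ S, y + t.sum = x := by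
  induction l generalizing S with
  | nil =>
    simp only [List.foldl_nil, List.sublist_nil]
    constructor
    · intro hx; exact ⟨[], rfl, x, hx, by simp⟩
    · rintro ⟨t, rfl, y, hy, hsum⟩; simpa using hsum ▸ (by simpa using hy)
  | cons d l' ih =>
    simp only [List.foldl_cons, ih]
    constructor
    · rintro ⟨t, ht, y, hy, hsum⟩
      rw [PySem.Set.mem_union] at hy
      rcases hy with hy | hy
      · exact ⟨t, ht.cons _, y, hy, hsum⟩
      · rw [PySem.Set.mem_ofList, List.mem_map] at hy
        rcases hy with ⟨y', hy', rfl⟩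
        exact ⟨d :: t, (List.cons_sublist_cons).2 ht, y', hy', by simp at hsum ⊢; omega⟩
    · rintro ⟨t, ht, y, hy, hsum⟩
      rcases List.sublist_cons_iff.1 ht with ht' | ⟨r, rfl, hr⟩
      · exact ⟨t, ht', y, by rw [PySem.Set.mem_union]; exact Or.inl hy, hsum⟩
      · refine ⟨r, hr, y + d, ?_, by simp at hsum ⊢; omega⟩
        rw [PySem.Set.mem_union, PySem.Set.mem_ofList, List.mem_map]
        exact Or.inr ⟨y, hy, rfl⟩

-- Per-number equivalence of the two membership tests, for div ≥ 1.
theorem per_div (div : Int) (hdiv : 1 ≤ div) (l : List Int) :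
    ((PySem.List.pyRange 1 ((l.length : Int) + 1)).any
        (fun i => decide (div ∈ (PySem.List.combinations l i.toNat).map List.sum)) = true)
      ↔ div ∈ l.foldl
          (fun sums i => PySem.Set.union sums (PySem.Set.ofList (sums.map (fun s => s + i))))
          (PySem.Set.ofList [(0 : Int)]) := by
  rw [mem_sumsFold, List.any_eq_true]
  constructor
  · rintro ⟨i, hi, hdec⟩
    rw [decide_eq_true_iff, List.mem_map] at hdec
    rcases hdec with ⟨c, hc, hsum⟩
    rcases (PySem.List.mem_combinations_iff l i.toNat c).1 hc with ⟨hsub, _⟩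
    exact ⟨c, hsub, 0, by simp [PySem.Set.mem_ofList], by omega⟩
  · rintro ⟨t, ht, y, hy, hsum⟩
    rw [PySem.Set.mem_ofList] at hy
    simp only [List.mem_singleton] at hy
    subst hy
    have htne : t ≠ [] := by
      rintro rfl; simp at hsum; omega
    have hlen1 : 1 ≤ t.length := List.length_pos_iff.2 htne
    have hlenle : t.length ≤ l.length := ht.length_le
    refine ⟨(t.length : Int), ?_, ?_⟩
    · rw [PySem.List.mem_pyRange_one]
      constructor <;> [exact_mod_cast hlen1; exact_mod_cast Nat.lt_succ_of_le hlenle]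
    · rw [decide_eq_true_iff, List.mem_map]
      refine ⟨t, (PySem.List.mem_combinations_iff l _ t).2 ⟨ht, by simp⟩, by omega⟩

-- ===== VERDICT (by name: the statement is the Claim_ definition above) =====
theorem semi_perfekt_digits_1_spec : Claim_equal_semi_perfekt_digits_1 := by
  intro digit _
  unfold Spec_semi_perfekt_digits_1 semi_perfekt_digits_1 semi_perfekt_digits_1_alt
  apply PySem.List.foldl_congr_mem
  intro result div hdiv
  rw [PySem.List.mem_pyRange_one] at hdiv
  simp only
  rw [PySem.List.foldl_append_if_eq_filter, PySem.List.foldl_if_eq_foldl_filter]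
  simp only [List.nil_append]
  split_ifs with h1 h2 h2
  · rfl
  · exact absurd ((per_div div hdiv.1 _).1 h1) h2
  · exact absurd ((per_div div hdiv.1 _).2 h2) h1
  · rfl
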